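-- pv_equiv track=rewrite | github.com/lukerosser/adventofcode | 2020/day-6/customs.py | declarations
-- ===== SOURCE A (Python) =====
-- def declarations(group_answers: str, number_of_people: int = None) -> int:
--   if not number_of_people:
--     return len(set(group_answers))
--   else:
--     common_answers = []
--     unique_answers = set(group_answers)
--     for answer in unique_answers:
--       if group_answers.count(answer) == number_of_people:
--         common_answers.append(answer)
--     return len(common_answers)
-- ===== SOURCE B (Python) =====
-- def declarations(group_answers: str, number_of_people: int = None) -> int:
--     # divide-and-conquer on distinct answers: strip all copies of the first
--     # answer, recurse on the shrunken string, and account for the removed run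
--     if not group_answers:
--         return 0
--     c = group_answers[0]
--     rest = group_answers.replace(c, '')
--     sub = declarations(rest, number_of_people)
--     if not number_of_people:
--         return 1 + sub
--     if len(group_answers) - len(rest) == number_of_people:
--         return sub + 1
--     return sub
-- ===== Notes on version B (the rewrite author's own statement) =====
-- stated objective: alternative
-- what changed: B is a recursive divide-and-conquer: it strips every copy of the first answer (str.replace), recurses on the shrunken string, and accounts for the removed run by its length difference, instead of A's build-a-set-then-rescan-with-count loop.
import Mathlib
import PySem

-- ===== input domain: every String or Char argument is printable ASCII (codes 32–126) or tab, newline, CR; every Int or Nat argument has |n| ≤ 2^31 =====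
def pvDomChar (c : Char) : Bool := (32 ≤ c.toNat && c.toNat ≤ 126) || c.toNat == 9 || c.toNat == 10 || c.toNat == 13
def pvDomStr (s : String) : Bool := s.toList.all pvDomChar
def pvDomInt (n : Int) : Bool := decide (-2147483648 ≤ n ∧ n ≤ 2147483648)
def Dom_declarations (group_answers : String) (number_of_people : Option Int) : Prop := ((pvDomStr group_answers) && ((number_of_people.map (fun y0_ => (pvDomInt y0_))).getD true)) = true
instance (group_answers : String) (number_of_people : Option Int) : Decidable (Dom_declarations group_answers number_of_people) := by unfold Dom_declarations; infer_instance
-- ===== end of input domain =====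

-- B replaces A's set-then-rescan-with-count loop by a recursive divide-and-conquer that strips all copies of the first answer and recurses on the shrunken string (alternative decomposition, same cost).


-- ===== PORT A =====
-- 'not number_of_people' is true for None and for 0; s.count(c) for a single char c is the char count (exact here).
def declarations (group_answers : String) (number_of_people : Option Int) : Int :=
  if number_of_people = none ∨ number_of_people = some 0 then
    ((PySem.Set.ofList group_answers.toList).length : Int)
  else
    let n := number_of_people.getD 0
    let unique_answers := PySem.Set.ofList group_answers.toList
    let common_answers : List Char := unique_answers.foldl
      (fun acc answer =>
        if (group_answers.toList.count answer : Int) = n then acc ++ [answer] else acc) []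
    (common_answers.length : Int)

-- ===== PORT B =====
-- group_answers.replace(c, '') for a single char c removes every occurrence of c: filter (· ≠ c) (exact here).
def declarationsAltGo (cs : List Char) (n? : Option Int) : Int :=
  match cs with
  | [] => 0
  | c :: rest0 =>
    let rest := (c :: rest0).filter (fun x => x ≠ c)
    let sub := declarationsAltGo rest n?
    if n? = none ∨ n? = some 0 then 1 + sub
    else if (((c :: rest0).length : Int) - (rest.length : Int)) = n?.getD 0 then sub + 1
    else sub
  termination_by cs.length
  decreasing_by
    simp only [List.filter_cons, ne_eq, decide_not, List.length_cons, decide_true,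
      Bool.not_true, Bool.false_eq_true, if_false]
    have := List.length_filter_le (fun x => !decide (x = c)) rest0
    omega

def declarations_alt (group_answers : String) (number_of_people : Option Int) : Int :=
  declarationsAltGo group_answers.toList number_of_people

-- ===== PRECONDITION & SPEC =====
def Spec_declarations (group_answers : String) (number_of_people : Option Int) (out : Int) : Prop := out = declarations_alt group_answers number_of_people
instance (group_answers : String) (number_of_people : Option Int) (out : Int) : Decidable (Spec_declarations group_answers number_of_people out) := by unfold Spec_declarations; infer_instance

-- ===== CLAIM (what is proved, stated in full; the proofs are below) =====
def Claim_equal_declarations : Prop := ∀ (group_answers : String) (number_of_people : Option Int), Dom_declarations group_answers number_of_people → Spec_declarations group_answers number_of_people (declarations group_answers number_of_people)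

-- ===== LEMMAS AND PROOFS =====

-- folding Set.add over elements all different from c, starting from c :: s, keeps c in front
theorem pv_foldl_add_cons (c : Char) (ds : List Char) (h : ∀ x ∈ ds, x ≠ c) (s : List Char) :
    ds.foldl PySem.Set.add (c :: s) = c :: ds.foldl PySem.Set.add s := by
  induction ds generalizing s with
  | nil => rfl
  | cons d ds ih =>
    have hd : d ≠ c := h d (by simp)
    have hrec := ih (fun x hx => h x (by simp [hx]))
    simp only [List.foldl_cons]
    rw [show PySem.Set.add (c :: s) d = c :: PySem.Set.add s d from by
      simp only [PySem.Set.add, PySem.Set.contains, List.contains_cons, List.cons_append]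
      split <;> simp_all]
    exact hrec (PySem.Set.add s d)

-- skipping elements equal to an already-present element does not change the fold
theorem pv_foldl_add_filter (c : Char) (ds : List Char) (s : List Char) (hc : c ∈ s) :
    ds.foldl PySem.Set.add s = (ds.filter (fun x => x ≠ c)).foldl PySem.Set.add s := by
  induction ds generalizing s with
  | nil => rfl
  | cons d ds ih =>
    by_cases hd : d = c
    · subst hd
      have hadd : PySem.Set.add s d = s := by
        simp [PySem.Set.add, PySem.Set.contains, hc]
      simp [hadd, ih s hc]
    · have hmem : c ∈ PySem.Set.add s d := by
        simp [PySem.Set.add]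
        split <;> simp [hc]
      simp [hd, ih _ hmem]

-- first-occurrence dedup peels its head
theorem pv_ofList_cons (c : Char) (rest0 : List Char) :
    PySem.Set.ofList (c :: rest0) = c :: PySem.Set.ofList (rest0.filter (fun x => x ≠ c)) := by
  rw [PySem.Set.ofList_eq_foldl, PySem.Set.ofList_eq_foldl, List.foldl_cons]
  have h1 : PySem.Set.add ([] : List Char) c = [c] := by rfl
  rw [h1, pv_foldl_add_filter c rest0 [c] (by simp)]
  exact pv_foldl_add_cons c _ (fun x hx => by
    have := List.of_mem_filter hx; simpa using this) []

-- total count of c plus the c-free remainder's length is the list's length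
theorem pv_count_filter_ne (c : Char) (cs : List Char) :
    cs.count c + (cs.filter (fun x => x ≠ c)).length = cs.length := by
  simp only [ne_eq, decide_not]
  induction cs with
  | nil => simp
  | cons a t ih =>
    by_cases h : a = c <;> simp [List.count_cons, List.filter_cons, h, ne_eq, decide_not] <;> omega

theorem pv_go_spec_aux (N : Nat) : ∀ (cs : List Char), cs.length ≤ N → ∀ (n? : Option Int),
    declarationsAltGo cs n? =
      if n? = none ∨ n? = some 0 then ((PySem.Set.ofList cs).length : Int)
      else (((PySem.Set.ofList cs).filter (fun k => decide ((cs.count k : Int) = n?.getD 0))).length : Int) := by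
  induction N with
  | zero =>
    intro cs h n?
    have hnil : cs = [] := List.eq_nil_of_length_eq_zero (Nat.le_zero.mp h)
    subst hnil
    by_cases hb : n? = none ∨ n? = some 0 <;> simp [declarationsAltGo, hb, PySem.Set.ofList]
  | succ N ih =>
    intro cs hlen n?
    match cs with
    | [] =>
      by_cases hb : n? = none ∨ n? = some 0 <;> simp [declarationsAltGo, hb, PySem.Set.ofList]
    | c :: rest0 =>
      have hrest_eq : (c :: rest0).filter (fun x => x ≠ c) = rest0.filter (fun x => x ≠ c) := by
        simp [List.filter_cons]
      have hlr : (rest0.filter (fun x => x ≠ c)).length ≤ N :=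
        le_trans (List.length_filter_le _ _) (Nat.succ_le_succ_iff.mp (by simpa using hlen))
      rw [declarationsAltGo]
      simp only [hrest_eq]
      rw [ih _ hlr n?, pv_ofList_cons c rest0]
      by_cases hb : n? = none ∨ n? = some 0
      · simp only [hb, if_true, List.length_cons]
        push_cast; ring
      · simp only [hb, if_false]
        have hkne : ∀ k ∈ PySem.Set.ofList (rest0.filter (fun x => x ≠ c)), k ≠ c := by
          intro k hk
          have : k ∈ rest0.filter (fun x => x ≠ c) := (PySem.Set.mem_ofList _ _).mp hk
          simpa using (List.of_mem_filter this)
        have hcongr : (PySem.Set.ofList (rest0.filter (fun x => x ≠ c))).filter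
              (fun k => decide (((c :: rest0).count k : Int) = n?.getD 0))
            = (PySem.Set.ofList (rest0.filter (fun x => x ≠ c))).filter
              (fun k => decide (((rest0.filter (fun x => x ≠ c)).count k : Int) = n?.getD 0)) := by
          apply List.filter_congr
          intro k hk
          have hne := hkne k hk
          have h1 : (c :: rest0).count k = rest0.count k := by simp [Ne.symm hne]
          have h2 : (rest0.filter (fun x => x ≠ c)).count k = rest0.count k := by
            rw [List.count_filter]; simpa using hne
          rw [h1, h2]
        have hcnt : (((c :: rest0).count c : Int)) =
            ((c :: rest0).length : Int) - ((rest0.filter (fun x => x ≠ c)).length : Int) := by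
          have h1 := pv_count_filter_ne c (c :: rest0)
          rw [show (c :: rest0).filter (fun x => x ≠ c) = rest0.filter (fun x => x ≠ c) from hrest_eq] at h1
          omega
        rw [List.filter_cons, hcongr]
        by_cases hc : ((c :: rest0).length : Int) - ((rest0.filter (fun x => x ≠ c)).length : Int) = n?.getD 0
        · rw [if_pos hc]
          have : decide (((c :: rest0).count c : Int) = n?.getD 0) = true := by
            rw [decide_eq_true_eq, hcnt]; exact hc
          simp only [this, if_true, List.length_cons]
          push_cast; ring
        · rw [if_neg hc]
          have : decide (((c :: rest0).count c : Int) = n?.getD 0) = false := by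
            rw [decide_eq_false_iff_not, hcnt]; exact hc
          simp only [this, Bool.false_eq_true, if_false]

theorem pv_go_spec (cs : List Char) (n? : Option Int) :
    declarationsAltGo cs n? =
      if n? = none ∨ n? = some 0 then ((PySem.Set.ofList cs).length : Int)
      else (((PySem.Set.ofList cs).filter (fun k => decide ((cs.count k : Int) = n?.getD 0))).length : Int) :=
  pv_go_spec_aux cs.length cs le_rfl n?

-- ===== VERDICT (by name: the statement is the Claim_ definition above) =====
theorem declarations_spec : Claim_equal_declarations := by
  intro s npeople _
  unfold Spec_declarations declarations declarations_alt
  rw [pv_go_spec]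
  by_cases h : npeople = none ∨ npeople = some 0
  · rw [if_pos h, if_pos h]
  · rw [if_neg h, if_neg h]
    simp only []
    rw [PySem.List.foldl_append_ite_eq_filter]
    simp
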